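-- pv_equiv track=rewrite | github.com/chairulridjaal/cs50-ai | Project/tictactoe/tictactoe.py | checkMaindiagonal
-- ===== SOURCE A (Python) =====
-- def checkMaindiagonal(board, player):
--     # Checks if the main diagonal "/" is equal
--     count = 0
--     for row in range(len(board)):
--         for col in range(len(board)):
--             if row == col and board[row][col] == player:
--                 count += 1
--     if count == 3:
--         return True
--     else:
--         return False
-- ===== SOURCE B (Python) =====
-- def checkMaindiagonal(board, player):
--     # Extract the main diagonal with enumerate, then use list.count.
--     diag = [row[i] for i, row in enumerate(board)]
--     return diag.count(player) == 3
-- ===== Notes on version B (the rewrite author's own statement) =====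
-- stated objective: simpler
-- what changed: Replaces the nested full-grid counting loop with a comprehension that extracts the diagonal via enumerate (indexing each row once) followed by the list.count built-in, keeping the exact count == 3 test.
import Mathlib
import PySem

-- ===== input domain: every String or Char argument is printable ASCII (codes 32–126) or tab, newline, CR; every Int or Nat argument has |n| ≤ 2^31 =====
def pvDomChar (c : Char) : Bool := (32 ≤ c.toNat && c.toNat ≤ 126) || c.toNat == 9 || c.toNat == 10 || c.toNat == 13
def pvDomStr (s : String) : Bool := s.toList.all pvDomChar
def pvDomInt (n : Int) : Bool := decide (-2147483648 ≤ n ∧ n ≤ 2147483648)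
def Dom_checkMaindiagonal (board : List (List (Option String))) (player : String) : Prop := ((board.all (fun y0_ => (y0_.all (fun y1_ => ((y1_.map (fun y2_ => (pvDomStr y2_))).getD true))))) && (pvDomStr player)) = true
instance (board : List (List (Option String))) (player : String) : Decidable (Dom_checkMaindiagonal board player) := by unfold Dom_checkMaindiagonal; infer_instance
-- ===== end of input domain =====

-- B extracts the diagonal via enumerate and uses list.count instead of A's nested full-grid counting loop (same count == 3 test): simpler decomposition.


-- ===== PORT A =====
-- Literal port of A: nested loops over range(len(board)); board[row][col] is read
-- only when row == col (Python's 'and' short-circuits), via pyGetD (in range under Pre_).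
def checkMaindiagonal (board : List (List (Option String))) (player : String) : Bool :=
  let n : Int := board.length
  let count : Int :=
    (PySem.List.pyRange 0 n 1).foldl (fun c row =>
      (PySem.List.pyRange 0 n 1).foldl (fun c' col =>
        if row == col &&
            (PySem.List.pyGetD (PySem.List.pyGetD board row []) col none == some player)
        then c' + 1 else c') c) 0
  if count == 3 then true else false

-- ===== PORT B =====
-- Literal port of B: diagonal extracted with enumerate, then list.count, then == 3.
def checkMaindiagonal_alt (board : List (List (Option String))) (player : String) : Bool :=
  let diag : List (Option String) :=
    (PySem.List.enumerate board).map (fun p => PySem.List.pyGetD p.2 p.1 none)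
  PySem.List.count diag (some player) == 3

-- ===== PRECONDITION & SPEC =====
-- Pre_ excludes only inputs where Python A (and B) raise IndexError: ragged boards
-- whose i-th row has no i-th entry for some i < len(board).
def Pre_checkMaindiagonal (board : List (List (Option String))) (player : String) : Prop :=
  ∀ i < board.length, i < (board.getD i []).length
instance (board : List (List (Option String))) (player : String) : Decidable (Pre_checkMaindiagonal board player) := by unfold Pre_checkMaindiagonal; infer_instance
def pvWitness_checkMaindiagonal : List (List (Option String)) × String :=
  ([[some "X", none, none], [none, some "X", none], [none, none, some "X"]], "X")
def Spec_checkMaindiagonal (board : List (List (Option String))) (player : String) (out : Bool) : Prop := out = checkMaindiagonal_alt board player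
instance (board : List (List (Option String))) (player : String) (out : Bool) : Decidable (Spec_checkMaindiagonal board player out) := by unfold Spec_checkMaindiagonal; infer_instance

-- ===== CLAIM (what is proved, stated in full; the proofs are below) =====
def Claim_equal_checkMaindiagonal : Prop := ∀ (board : List (List (Option String))) (player : String), Dom_checkMaindiagonal board player → Pre_checkMaindiagonal board player → Spec_checkMaindiagonal board player (checkMaindiagonal board player)

-- ===== LEMMAS AND PROOFS =====

-- Inner loop of A: scanning all columns but acting only at col = row adds 0 or 1.
theorem pv_inner (P : Int → Bool) (row : Int) (n : Nat) (c : Int) :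
    (PySem.List.pyRange 0 (n : Int) 1).foldl (fun c' col =>
        if row == col && P col then c' + 1 else c') c
      = c + (if 0 ≤ row ∧ row < (n : Int) ∧ P row = true then 1 else 0) := by
  induction n generalizing c with
  | zero =>
      rw [PySem.List.pyRange_one_eq_nil (by norm_num),
        if_neg (by rintro ⟨h1, h2, -⟩; omega)]
      simp
  | succ m ih =>
      have h : ((m + 1 : Nat) : Int) = (m : Int) + 1 := by push_cast; ring
      rw [h, PySem.List.pyRange_one_succ_right (by positivity), List.foldl_append, ih]
      simp only [List.foldl_cons, List.foldl_nil]
      by_cases hr : row = (m : Int)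
      · subst hr
        rw [if_neg (by rintro ⟨-, h2, -⟩; omega :
          ¬ (0 ≤ (m : Int) ∧ (m : Int) < (m : Int) ∧ P (m : Int) = true))]
        cases hp : P (m : Int)
        · simp only [Bool.and_false, Bool.false_eq_true, if_false]
          rw [if_neg (by rintro ⟨-, -, h3⟩; simp at h3)]
        · rw [if_pos (by simp), if_pos ⟨by positivity, by omega, rfl⟩]
          ring
      · have hb : (row == (m : Int)) = false := by simp [hr]
        have hiff : (0 ≤ row ∧ row < (m : Int) ∧ P row = true) ↔
            (0 ≤ row ∧ row < (m : Int) + 1 ∧ P row = true) := by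
          constructor <;> rintro ⟨h1, h2, h3⟩ <;> exact ⟨h1, by omega, h3⟩
        rw [hb]
        simp only [Bool.false_and, Bool.false_eq_true, if_false]
        rw [if_congr hiff rfl rfl]

theorem checkMaindiagonal_spec : Claim_equal_checkMaindiagonal := by
  intro board player _ _
  unfold Spec_checkMaindiagonal checkMaindiagonal checkMaindiagonal_alt
  set P : Int → Bool :=
    fun i => PySem.List.pyGetD (PySem.List.pyGetD board i []) i none == some player
  -- A's nested count equals A's single-loop diagonal count …
  have hA :
      (PySem.List.pyRange 0 (board.length : Int) 1).foldl (fun c row =>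
        (PySem.List.pyRange 0 (board.length : Int) 1).foldl (fun c' col =>
          if row == col &&
              (PySem.List.pyGetD (PySem.List.pyGetD board row []) col none == some player)
          then c' + 1 else c') c) (0 : Int)
      = ((PySem.List.pyRange 0 (board.length : Int) 1).countP P : Int) := by
    have h1 :
        (PySem.List.pyRange 0 (board.length : Int) 1).foldl (fun c row =>
          (PySem.List.pyRange 0 (board.length : Int) 1).foldl (fun c' col =>
            if row == col &&
                (PySem.List.pyGetD (PySem.List.pyGetD board row []) col none == some player)
            then c' + 1 else c') c) (0 : Int)
        = (PySem.List.pyRange 0 (board.length : Int) 1).foldl (fun c i =>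
            if P i then c + 1 else c) (0 : Int) := by
      apply List.foldl_ext
      intro c row hrow
      rw [pv_inner]
      rw [PySem.List.mem_pyRange_one] at hrow
      by_cases hp : P row = true
      · rw [if_pos ⟨hrow.1, hrow.2, hp⟩, if_pos hp]
      · rw [if_neg (by rintro ⟨-, -, h3⟩; exact hp h3), if_neg hp]
        ring
    rw [h1, PySem.List.foldl_count_if]
    ring
  -- … which is B's diagonal count.
  have hB :
      PySem.List.count
        ((PySem.List.enumerate board).map (fun p => PySem.List.pyGetD p.2 p.1 none))
        (some player)
      = (PySem.List.pyRange 0 (board.length : Int) 1).countP P := by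
    rw [PySem.List.enumerate_eq_map_pyRange board [], PySem.List.count_eq,
      List.count_eq_countP, List.map_map, List.countP_map]
    rfl
  simp only [hA, hB]
  by_cases h : (PySem.List.pyRange 0 (board.length : Int) 1).countP P = 3
  · simp [h]
  · have h' : ((PySem.List.pyRange 0 (board.length : Int) 1).countP P : Int) ≠ 3 := by
      exact_mod_cast h
    simp [h, h']

-- ===== VERDICT (by name: the statement is the Claim_ definition above) =====
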